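-- pv_equiv track=rewrite | github.com/tayoogunbiyi/30DaysOfAlgos | Day13.py | find_length_of_smallest_subarray_gt_k
-- ===== SOURCE A (Python) =====
-- def find_length_of_smallest_subarray_gt_k(arr, k):
--     ans = len(arr)+1
--
--     for i in range(len(arr)):
--         for j in range(i, len(arr)):
--             curr_subarray_sum = sum(arr[i:j+1])
--             if curr_subarray_sum > k:
--                 ans = min(ans, j-i+1)
--     return ans if ans != len(arr)+1 else 0
-- ===== SOURCE B (Python) =====
-- def find_length_of_smallest_subarray_gt_k(arr, k):
--     n = len(arr)
--     prefix = [0]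
--     running = 0
--     for x in arr:
--         running += x
--         prefix.append(running)
--     best = n + 1
--     for i in range(n):
--         for j in range(i + 1, n + 1):
--             if prefix[j] - prefix[i] > k:
--                 best = min(best, j - i)
--     return best if best <= n else 0
-- ===== Notes on version B (the rewrite author's own statement) =====
-- stated objective: faster
-- what changed: B builds a prefix-sum list once and tests each (i,j) pair by a constant-time difference prefix[j]-prefix[i], instead of A's re-summing the slice arr[i:j+1] for every pair.
import Mathlib
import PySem

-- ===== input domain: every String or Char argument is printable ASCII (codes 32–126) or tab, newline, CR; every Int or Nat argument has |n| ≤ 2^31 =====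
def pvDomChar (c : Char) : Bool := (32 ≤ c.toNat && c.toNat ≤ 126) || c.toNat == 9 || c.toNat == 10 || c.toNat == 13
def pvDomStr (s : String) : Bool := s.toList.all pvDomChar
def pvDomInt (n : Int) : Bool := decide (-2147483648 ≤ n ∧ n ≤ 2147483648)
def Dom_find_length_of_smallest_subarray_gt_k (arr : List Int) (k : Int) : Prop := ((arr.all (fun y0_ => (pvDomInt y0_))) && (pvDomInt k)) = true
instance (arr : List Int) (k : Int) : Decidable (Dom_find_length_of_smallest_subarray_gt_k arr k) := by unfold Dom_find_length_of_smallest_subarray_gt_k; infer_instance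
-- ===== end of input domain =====

-- B replaces A's per-pair slice re-summation (O(n^3)) by a prefix-sum list built once (O(n^2)); return value only, no mutation.

-- ===== PORT A =====
def find_length_of_smallest_subarray_gt_k (arr : List Int) (k : Int) : Int :=
  let n : Int := (arr.length : Int)
  let ans :=
    (PySem.List.pyRange 0 n).foldl (fun ans i =>
      (PySem.List.pyRange i n).foldl (fun ans j =>
        let curr_subarray_sum := (PySem.List.slice arr (some i) (some (j + 1))).sum
        if curr_subarray_sum > k then min ans (j - i + 1) else ans) ans)
      (n + 1)
  if ans ≠ n + 1 then ans else 0

-- ===== PORT B =====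
-- prefix[j]/prefix[i] are always accessed with 0 ≤ i,j ≤ len(arr), in range, so pyGetD's default is never used.
def find_length_of_smallest_subarray_gt_k_alt (arr : List Int) (k : Int) : Int :=
  let n : Int := (arr.length : Int)
  let pre := (arr.foldl (fun (s : List Int × Int) x => (s.1 ++ [s.2 + x], s.2 + x)) ([0], 0)).1
  let best :=
    (PySem.List.pyRange 0 n).foldl (fun best i =>
      (PySem.List.pyRange (i + 1) (n + 1)).foldl (fun best j =>
        if PySem.List.pyGetD pre j 0 - PySem.List.pyGetD pre i 0 > k then min best (j - i) else best) best)
      (n + 1)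
  if best ≤ n then best else 0

-- ===== PRECONDITION & SPEC =====
def Spec_find_length_of_smallest_subarray_gt_k (arr : List Int) (k : Int) (out : Int) : Prop := out = find_length_of_smallest_subarray_gt_k_alt arr k
instance (arr : List Int) (k : Int) (out : Int) : Decidable (Spec_find_length_of_smallest_subarray_gt_k arr k out) := by unfold Spec_find_length_of_smallest_subarray_gt_k; infer_instance

-- ===== CLAIM (what is proved, stated in full; the proofs are below) =====
def Claim_equal_find_length_of_smallest_subarray_gt_k : Prop := ∀ (arr : List Int) (k : Int), Dom_find_length_of_smallest_subarray_gt_k arr k → Spec_find_length_of_smallest_subarray_gt_k arr k (find_length_of_smallest_subarray_gt_k arr k)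

-- ===== LEMMAS AND PROOFS =====

-- the list of running sums that B's first loop appends
def pvPsums : List Int → Int → List Int
  | [], _ => []
  | x :: xs, r => (r + x) :: pvPsums xs (r + x)

lemma pv_foldl_prefix (arr : List Int) (acc : List Int) (r : Int) :
    arr.foldl (fun (s : List Int × Int) x => (s.1 ++ [s.2 + x], s.2 + x)) (acc, r)
      = (acc ++ pvPsums arr r, r + arr.sum) := by
  induction arr generalizing acc r with
  | nil => simp [pvPsums]
  | cons x xs ih => simp [pvPsums, ih, add_assoc]

lemma pv_psums_getD (arr : List Int) (r : Int) (t : Nat) (ht : t < arr.length) :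
    (pvPsums arr r).getD t 0 = r + (arr.take (t + 1)).sum := by
  induction arr generalizing r t with
  | nil => simp at ht
  | cons x xs ih =>
    cases t with
    | zero => simp [pvPsums]
    | succ s =>
      simp only [List.length_cons, Nat.succ_lt_succ_iff] at ht
      simp only [pvPsums, List.getD_cons_succ, ih (r + x) s ht]
      simp [add_assoc]

lemma pv_prefix_getD (arr : List Int) (t : Nat) (ht : t ≤ arr.length) :
    PySem.List.pyGetD (0 :: pvPsums arr 0) ((t : Nat) : Int) 0 = (arr.take t).sum := by
  rw [PySem.List.pyGetD_of_nonneg _ _ (by positivity)]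
  simp only [Int.toNat_natCast]
  cases t with
  | zero => simp
  | succ s =>
    have hs : s < arr.length := by omega
    simp only [List.getD_cons_succ, pv_psums_getD arr 0 s hs]
    simp

lemma pv_slice_sum (arr : List Int) (i j : Nat) (hij : i ≤ j) (_hj : j < arr.length) :
    (PySem.List.slice arr (some ((i : Nat) : Int)) (some (((j : Nat) : Int) + 1))).sum
      = (arr.take (j + 1)).sum - (arr.take i).sum := by
  have h1 : (((j : Nat) : Int) + 1) = (((j + 1 : Nat) : Nat) : Int) := by push_cast; ring
  rw [h1, PySem.List.slice_natCast]
  have key : (arr.take (j + 1)).sum = (arr.take i).sum + ((arr.drop i).take (j + 1 - i)).sum := by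
    have h4 : j + 1 = i + (j + 1 - i) := by omega
    rw [h4, List.take_add, List.sum_append]
    simp
  rw [key]
  ring

-- shifting a step-1 range by 1
lemma pv_pyRange_shift (a b : Int) :
    PySem.List.pyRange (a + 1) (b + 1) = (PySem.List.pyRange a b).map (· + 1) := by
  by_cases hab : a < b
  · have h : (b - a).toNat ≠ 0 := by omega
    obtain ⟨m, hm⟩ : ∃ m, (b - a).toNat = m := ⟨_, rfl⟩
    induction m generalizing a with
    | zero => omega
    | succ p ih =>
      rw [PySem.List.pyRange_one_cons hab, PySem.List.pyRange_one_cons (by omega : a + 1 < b + 1)]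
      by_cases h2 : a + 1 < b
      · rw [ih (a + 1) h2 (by omega) (by omega)]
        simp
      · have hb : b = a + 1 := by omega
        subst hb
        simp [PySem.List.pyRange_one_eq_nil (le_refl (a + 1)),
              PySem.List.pyRange_one_eq_nil (le_refl (a + 1 + 1))]
  · rw [PySem.List.pyRange_one_eq_nil (by omega), PySem.List.pyRange_one_eq_nil (by omega)]
    simp

-- a fold that never increases its accumulator stays ≤ its start
lemma pv_foldl_le {α : Type} (l : List α) (f : Int → α → Int) (a : Int)
    (h : ∀ b x, f b x ≤ b) : l.foldl f a ≤ a := by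
  induction l generalizing a with
  | nil => simp
  | cons x xs ih => exact le_trans (ih (f a x)) (h a x)

lemma pv_ans_le (arr : List Int) (k : Int) :
    (PySem.List.pyRange 0 ((arr.length : Int))).foldl (fun ans i =>
      (PySem.List.pyRange i (arr.length : Int)).foldl (fun ans j =>
        let curr_subarray_sum := (PySem.List.slice arr (some i) (some (j + 1))).sum
        if curr_subarray_sum > k then min ans (j - i + 1) else ans) ans)
      ((arr.length : Int) + 1) ≤ (arr.length : Int) + 1 := by
  apply pv_foldl_le
  intro b i
  apply pv_foldl_le
  intro c j
  dsimp only
  split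
  · exact min_le_left _ _
  · exact le_refl c

-- the two nested folds compute the same value
lemma pv_folds_eq (arr : List Int) (k : Int) :
    (PySem.List.pyRange 0 ((arr.length : Int))).foldl (fun ans i =>
      (PySem.List.pyRange i (arr.length : Int)).foldl (fun ans j =>
        let curr_subarray_sum := (PySem.List.slice arr (some i) (some (j + 1))).sum
        if curr_subarray_sum > k then min ans (j - i + 1) else ans) ans)
      ((arr.length : Int) + 1)
    = (PySem.List.pyRange 0 ((arr.length : Int))).foldl (fun best i =>
      (PySem.List.pyRange (i + 1) ((arr.length : Int) + 1)).foldl (fun best j =>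
        if PySem.List.pyGetD ((arr.foldl (fun (s : List Int × Int) x => (s.1 ++ [s.2 + x], s.2 + x)) ([0], 0)).1) j 0
             - PySem.List.pyGetD ((arr.foldl (fun (s : List Int × Int) x => (s.1 ++ [s.2 + x], s.2 + x)) ([0], 0)).1) i 0 > k
         then min best (j - i) else best) best)
      ((arr.length : Int) + 1) := by
  have hpr : (arr.foldl (fun (s : List Int × Int) x => (s.1 ++ [s.2 + x], s.2 + x)) ([0], 0)).1
      = 0 :: pvPsums arr 0 := by
    rw [pv_foldl_prefix]
    rfl
  rw [hpr]
  apply PySem.List.foldl_congr_mem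
  intro acc i hi
  rw [PySem.List.mem_pyRange_one] at hi
  rw [pv_pyRange_shift, List.foldl_map]
  apply PySem.List.foldl_congr_mem
  intro acc2 j hj
  rw [PySem.List.mem_pyRange_one] at hj
  -- name the nat forms of i and j
  obtain ⟨iN, hiN⟩ : ∃ m : Nat, (m : Int) = i := ⟨i.toNat, Int.toNat_of_nonneg hi.1⟩
  obtain ⟨jN, hjN⟩ : ∃ m : Nat, (m : Int) = j := ⟨j.toNat, Int.toNat_of_nonneg (by omega)⟩
  subst hiN hjN
  have hiL : iN ≤ arr.length := by exact_mod_cast hi.2.le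
  have hjL : jN < arr.length := by exact_mod_cast hj.2
  have hij : iN ≤ jN := by exact_mod_cast hj.1
  dsimp only
  rw [pv_slice_sum arr iN jN hij hjL]
  have hj1 : ((jN : Int) + 1) = (((jN + 1 : Nat)) : Int) := by push_cast; ring
  rw [hj1, pv_prefix_getD arr (jN + 1) (by omega), pv_prefix_getD arr iN hiL]
  have hback : (((jN + 1 : Nat)) : Int) - (iN : Int) = (jN : Int) - (iN : Int) + 1 := by push_cast; ring
  rw [hback]

-- ===== VERDICT (by name: the statement is the Claim_ definition above) =====
theorem find_length_of_smallest_subarray_gt_k_spec : Claim_equal_find_length_of_smallest_subarray_gt_k := by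
  intro arr k _
  unfold Spec_find_length_of_smallest_subarray_gt_k
  unfold find_length_of_smallest_subarray_gt_k find_length_of_smallest_subarray_gt_k_alt
  simp only []
  rw [← pv_folds_eq arr k]
  have hle := pv_ans_le arr k
  set v := (PySem.List.pyRange 0 ((arr.length : Int))).foldl (fun ans i =>
      (PySem.List.pyRange i (arr.length : Int)).foldl (fun ans j =>
        let curr_subarray_sum := (PySem.List.slice arr (some i) (some (j + 1))).sum
        if curr_subarray_sum > k then min ans (j - i + 1) else ans) ans)
      ((arr.length : Int) + 1) with hv
  split_ifs with h1 h2 h2 <;> omega
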